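-- pv_equiv track=rewrite | github.com/AlexVersin/Python_GB | Lesson_5/Task_2_2.py | iterator_with_yield
-- ===== SOURCE A (Python) =====
-- def iterator_with_yield(n):
--     start = 1
--     step = 2
--     last_nums = start
--     while start <= n:
--         yield start, last_nums
--         start += step
--         last_nums = last_nums + start
-- ===== SOURCE B (Python) =====
-- def iterator_with_yield(n):
--     # The loop yields the first m odd numbers with their running sums, where
--     # m = number of odd numbers <= n, and the running sum of the first k odd
--     # numbers is k*k.  So compute the count up front and emit closed forms.
--     m = max(0, (int(n) + 1) // 2)
--     for k in range(1, m + 1):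
--         yield 2 * k - 1, k * k
-- ===== Notes on version B (the rewrite author's own statement) =====
-- stated objective: simpler
-- what changed: B replaces the while loop with accumulator state (start, last_nums) by computing the iteration count m = (n+1)//2 up front and emitting the closed forms (2k-1, k*k) over range(1, m+1), eliminating both pieces of loop-carried state.
import Mathlib
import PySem

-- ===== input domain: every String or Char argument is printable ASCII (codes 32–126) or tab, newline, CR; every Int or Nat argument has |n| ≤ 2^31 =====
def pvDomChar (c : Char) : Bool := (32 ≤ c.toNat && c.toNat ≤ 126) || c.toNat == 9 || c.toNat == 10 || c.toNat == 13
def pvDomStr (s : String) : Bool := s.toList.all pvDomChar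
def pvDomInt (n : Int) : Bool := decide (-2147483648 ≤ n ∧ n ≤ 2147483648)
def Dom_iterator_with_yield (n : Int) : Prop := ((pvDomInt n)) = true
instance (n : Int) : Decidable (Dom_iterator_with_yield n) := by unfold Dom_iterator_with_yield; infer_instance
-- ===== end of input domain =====

-- B computes the iteration count m = (n+1)//2 up front and maps closed forms (2k-1, k*k)
-- over range(1, m+1), replacing A's while loop with its two pieces of accumulator state (simpler).

-- ===== PORT A =====
-- A's while loop: state (start, last_nums); yields (start, last_nums), then start += 2, last_nums += new start.
def iteratorA_loop (n start last : Int) : List (Int × Int) :=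
  if start ≤ n then (start, last) :: iteratorA_loop n (start + 2) (last + (start + 2)) else []
termination_by (n + 1 - start).toNat
decreasing_by omega

def iterator_with_yield (n : Int) : List (Int × Int) :=
  iteratorA_loop n 1 1

-- ===== PORT B =====
-- B: m = max(0, (int(n) + 1) // 2); for k in range(1, m+1): yield (2k-1, k*k).
def iterator_with_yield_alt (n : Int) : List (Int × Int) :=
  let m := max 0 (PySem.Int.floordiv (n + 1) 2)
  (PySem.List.pyRange 1 (m + 1) 1).map (fun k => (2 * k - 1, k * k))

-- ===== PRECONDITION & SPEC =====
def Spec_iterator_with_yield (n : Int) (out : List (Int × Int)) : Prop := out = iterator_with_yield_alt n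
instance (n : Int) (out : List (Int × Int)) : Decidable (Spec_iterator_with_yield n out) := by unfold Spec_iterator_with_yield; infer_instance

-- ===== CLAIM (what is proved, stated in full; the proofs are below) =====
def Claim_equal_iterator_with_yield : Prop := ∀ (n : Int), Dom_iterator_with_yield n → Spec_iterator_with_yield n (iterator_with_yield n)

-- ===== LEMMAS AND PROOFS =====
-- Invariant: at A's state (start, last) with start = 2*k - 1 and last = k*k, the rest of A's
-- loop is the mapped tail of B's range.
theorem loopA_eq_map_range (n : Int) : ∀ (fuel : Nat) (k : Int), 1 ≤ k → (n + 1 - (2 * k - 1)).toNat ≤ fuel →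
    iteratorA_loop n (2 * k - 1) (k * k)
      = (PySem.List.pyRange k (max 0 (PySem.Int.floordiv (n + 1) 2) + 1) 1).map
          (fun j => (2 * j - 1, j * j)) := by
  have hm : PySem.Int.floordiv (n + 1) 2 = (n + 1) / 2 :=
    PySem.Int.floordiv_eq_ediv_of_pos (by norm_num)
  intro fuel
  induction fuel with
  | zero =>
    intro k hk1 hk
    rw [iteratorA_loop, if_neg (by omega)]
    rw [PySem.List.pyRange_one_eq_nil (by rw [hm]; omega), List.map_nil]
  | succ fuel ih =>
    intro k hk1 hk
    by_cases h : 2 * k - 1 ≤ n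
    · rw [iteratorA_loop, if_pos h]
      have hlt : k < max 0 (PySem.Int.floordiv (n + 1) 2) + 1 := by rw [hm]; omega
      rw [PySem.List.pyRange_one_cons hlt, List.map_cons]
      have h1 : (2 * k - 1) + 2 = 2 * (k + 1) - 1 := by ring
      rw [h1, show k * k + (2 * (k + 1) - 1) = (k + 1) * (k + 1) from by ring,
        ih (k + 1) (by omega) (by omega)]
    · rw [iteratorA_loop, if_neg h]
      rw [PySem.List.pyRange_one_eq_nil (by rw [hm]; omega), List.map_nil]

-- ===== VERDICT (by name: the statement is the Claim_ definition above) =====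
theorem iterator_with_yield_spec : Claim_equal_iterator_with_yield := by
  intro n _
  unfold Spec_iterator_with_yield iterator_with_yield iterator_with_yield_alt
  have := loopA_eq_map_range n (n + 1 - (2 * 1 - 1)).toNat 1 (le_refl 1) (le_refl _)
  norm_num at this ⊢
  exact this
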